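-- pv_equiv track=rewrite | github.com/alta7700/MEDoc | bots/vk_bot/bot_funcs.py | fill_f_and_d_in_kb
-- ===== SOURCE A (Python) =====
-- def fill_f_and_d_in_kb(f_and_d: list, btn_in_line: int, first_line=None):
--     f_title_list = []
--     d_title_list = []
--     if first_line:
--         kb = {1: [first_line], 2: []}
--         num = 2
--     else:
--         kb = {1: []}
--         num = 1
--     for p in f_and_d:
--         if p[0] == 'f':
--             kb[num].append((f"{p[1]}){p[2][:30]}", 'secondary', f'{{"button":"folder-{p[3]}"}}'))
--             f_title_list.append(f"{p[1]}) {p[2]}")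
--         else:
--             kb[num].append((f"{p[1]}){p[2][:30]}", 'positive', f'{{"button":"doc-{p[3]}"}}'))
--             d_title_list.append(f"{p[1]}) {p[2]}")
--         if len(kb[num]) == btn_in_line:
--             num += 1
--             kb[num] = []
--     if not kb[num]:
--         del kb[num]
--         num -= 1
--     return kb, num, f_title_list, d_title_list
-- ===== SOURCE B (Python) =====
-- def fill_f_and_d_in_kb(f_and_d: list, btn_in_line: int, first_line=None):
--     f_title_list = []
--     d_title_list = []
--     btns = []
--     for p in f_and_d:
--         if p[0] == 'f':
--             btns.append((f"{p[1]}){p[2][:30]}", 'secondary', f'{{"button":"folder-{p[3]}"}}'))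
--             f_title_list.append(f"{p[1]}) {p[2]}")
--         else:
--             btns.append((f"{p[1]}){p[2][:30]}", 'positive', f'{{"button":"doc-{p[3]}"}}'))
--             d_title_list.append(f"{p[1]}) {p[2]}")
--     chunks = _chunks(btns, btn_in_line)
--     if first_line:
--         kb = {1: [first_line]}
--         num = 1
--     else:
--         kb = {}
--         num = 0
--     for c in chunks:
--         num += 1
--         kb[num] = c
--     return kb, num, f_title_list, d_title_list
--
--
-- def _chunks(btns, n):
--     if n <= 0:
--         return [btns] if btns else []
--     out = []
--     while btns:
--         out.append(btns[:n])
--         btns = btns[n:]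
--     return out
-- ===== Notes on version B (the rewrite author's own statement) =====
-- stated objective: alternative
-- what changed: Instead of interleaving dict mutation with the scan (appending into kb[num] and opening/deleting trailing empty lines), B first builds the flat button list and the two title lists in one pass, then chunks the buttons into lines of btn_in_line and numbers the chunks, so no empty line is ever created or deleted.
import Mathlib
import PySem

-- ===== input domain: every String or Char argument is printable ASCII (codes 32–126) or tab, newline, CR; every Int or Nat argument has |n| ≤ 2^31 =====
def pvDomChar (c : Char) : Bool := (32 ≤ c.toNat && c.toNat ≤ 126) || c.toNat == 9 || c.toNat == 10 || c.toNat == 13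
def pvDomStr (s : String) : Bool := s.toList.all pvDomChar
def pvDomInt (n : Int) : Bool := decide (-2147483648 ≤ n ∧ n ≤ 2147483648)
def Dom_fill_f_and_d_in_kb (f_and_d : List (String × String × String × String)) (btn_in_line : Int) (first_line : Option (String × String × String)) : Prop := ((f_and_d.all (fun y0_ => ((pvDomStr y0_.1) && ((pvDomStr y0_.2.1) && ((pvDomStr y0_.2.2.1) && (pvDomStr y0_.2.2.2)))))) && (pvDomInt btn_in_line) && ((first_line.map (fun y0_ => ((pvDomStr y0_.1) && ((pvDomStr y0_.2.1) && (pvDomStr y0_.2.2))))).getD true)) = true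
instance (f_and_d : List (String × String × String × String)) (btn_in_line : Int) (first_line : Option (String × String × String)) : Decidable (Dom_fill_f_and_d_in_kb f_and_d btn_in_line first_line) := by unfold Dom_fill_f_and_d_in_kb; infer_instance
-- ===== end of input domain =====

-- B replaces A's interleaved dict mutation (append into kb[num], open/delete trailing empty lines)
-- by one flat scan building the button and title lists, then a separate chunk-and-number pass
-- (objective: alternative decomposition, same cost).

-- ===== PORT A =====
-- A's for-loop over f_and_d: state is (kb, num, f_title_list, d_title_list); kb[num].append(…) is
-- kb.modify num [] (· ++ [btn]) (num is always a key of kb, so the [] default is never used).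
def fillLoopA (btn_in_line : Int)
    (st : PySem.Dict Int (List (String × String × String)) × Int × List String × List String)
    (ps : List (String × String × String × String)) :
    PySem.Dict Int (List (String × String × String)) × Int × List String × List String :=
  match ps with
  | [] => st
  | p :: rest =>
    let kb := st.1
    let num := st.2.1
    let ft := st.2.2.1
    let dt := st.2.2.2
    let st' :=
      if p.1 == "f" then
        (kb.modify num [] (· ++ [(p.2.1 ++ ")" ++ PySem.Str.slice p.2.2.1 none (some 30),
            "secondary", "{\"button\":\"folder-" ++ p.2.2.2 ++ "\"}")]),
         ft ++ [p.2.1 ++ ") " ++ p.2.2.1], dt)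
      else
        (kb.modify num [] (· ++ [(p.2.1 ++ ")" ++ PySem.Str.slice p.2.2.1 none (some 30),
            "positive", "{\"button\":\"doc-" ++ p.2.2.2 ++ "\"}")]),
         ft, dt ++ [p.2.1 ++ ") " ++ p.2.2.1])
    if ((st'.1.getD num []).length : Int) = btn_in_line then
      fillLoopA btn_in_line (st'.1.insert (num + 1) [], num + 1, st'.2.1, st'.2.2) rest
    else
      fillLoopA btn_in_line (st'.1, num, st'.2.1, st'.2.2) rest

def fill_f_and_d_in_kb (f_and_d : List (String × String × String × String)) (btn_in_line : Int) (first_line : Option (String × String × String)) : (List (Int × List (String × String × String))) × Int × List String × List String :=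
  -- 'if first_line:' — a 3-tuple is always truthy, so this is isSome
  let init : PySem.Dict Int (List (String × String × String)) × Int :=
    match first_line with
    | some l => (PySem.Dict.mk [(1, [l]), (2, [])], 2)   -- dict literal {1: [first_line], 2: []}
    | none => (PySem.Dict.mk [(1, [])], 1)               -- dict literal {1: []}
  let r := fillLoopA btn_in_line (init.1, init.2, [], []) f_and_d
  -- 'if not kb[num]: del kb[num]; num -= 1'
  let fin : PySem.Dict Int (List (String × String × String)) × Int :=
    if (r.1.getD r.2.1 []).isEmpty then (r.1.erase r.2.1, r.2.1 - 1) else (r.1, r.2.1)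
  (fin.1.items, fin.2, r.2.2.1, r.2.2.2)

-- ===== PORT B =====
-- Source B's first loop: one pass building (btns, f_title_list, d_title_list).
def scanB (ps : List (String × String × String × String))
    (acc : List (String × String × String) × List String × List String) :
    List (String × String × String) × List String × List String :=
  match ps with
  | [] => acc
  | p :: rest =>
    if p.1 == "f" then
      scanB rest (acc.1 ++ [(p.2.1 ++ ")" ++ PySem.Str.slice p.2.2.1 none (some 30),
          "secondary", "{\"button\":\"folder-" ++ p.2.2.2 ++ "\"}")],
        acc.2.1 ++ [p.2.1 ++ ") " ++ p.2.2.1], acc.2.2)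
    else
      scanB rest (acc.1 ++ [(p.2.1 ++ ")" ++ PySem.Str.slice p.2.2.1 none (some 30),
          "positive", "{\"button\":\"doc-" ++ p.2.2.2 ++ "\"}")],
        acc.2.1, acc.2.2 ++ [p.2.1 ++ ") " ++ p.2.2.1])

-- Source B's _chunks while-loop for n > 0; chunk size is k+1; btns[:n] / btns[n:] are take/drop (exact for n > 0)
def chunkPos (k : Nat) : List (String × String × String) → List (List (String × String × String))
  | [] => []
  | b :: bs => ((b :: bs).take (k + 1)) :: chunkPos k ((b :: bs).drop (k + 1))
  termination_by l => l.length
  decreasing_by simp [List.length_drop]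

-- Source B's _chunks
def chunksB (n : Int) (bs : List (String × String × String)) : List (List (String × String × String)) :=
  if n ≤ 0 then (if bs.isEmpty then [] else [bs]) else chunkPos (n.toNat - 1) bs

def fill_f_and_d_in_kb_alt (f_and_d : List (String × String × String × String)) (btn_in_line : Int) (first_line : Option (String × String × String)) : (List (Int × List (String × String × String))) × Int × List String × List String :=
  let s := scanB f_and_d ([], [], [])
  let cs := chunksB btn_in_line s.1
  let init : PySem.Dict Int (List (String × String × String)) × Int :=
    match first_line with
    | some l => (PySem.Dict.mk [(1, [l])], 1)
    | none => (PySem.Dict.empty, 0)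
  let r := cs.foldl (fun (st : PySem.Dict Int (List (String × String × String)) × Int) c =>
    (st.1.insert (st.2 + 1) c, st.2 + 1)) init
  (r.1.items, r.2, s.2.1, s.2.2)

-- ===== PRECONDITION & SPEC =====
def Spec_fill_f_and_d_in_kb (f_and_d : List (String × String × String × String)) (btn_in_line : Int) (first_line : Option (String × String × String)) (out : (List (Int × List (String × String × String))) × Int × List String × List String) : Prop := out = fill_f_and_d_in_kb_alt f_and_d btn_in_line first_line
instance (f_and_d : List (String × String × String × String)) (btn_in_line : Int) (first_line : Option (String × String × String)) (out : (List (Int × List (String × String × String))) × Int × List String × List String) : Decidable (Spec_fill_f_and_d_in_kb f_and_d btn_in_line first_line out) := by unfold Spec_fill_f_and_d_in_kb; infer_instance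

-- ===== CLAIM (what is proved, stated in full; the proofs are below) =====
def Claim_equal_fill_f_and_d_in_kb : Prop := ∀ (f_and_d : List (String × String × String × String)) (btn_in_line : Int) (first_line : Option (String × String × String)), Dom_fill_f_and_d_in_kb f_and_d btn_in_line first_line → Spec_fill_f_and_d_in_kb f_and_d btn_in_line first_line (fill_f_and_d_in_kb f_and_d btn_in_line first_line)

-- ===== LEMMAS AND PROOFS =====

-- proof-side closed forms of the per-element data
def pvBtnOf (p : String × String × String × String) : String × String × String :=
  (p.2.1 ++ ")" ++ PySem.Str.slice p.2.2.1 none (some 30),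
   if p.1 == "f" then "secondary" else "positive",
   if p.1 == "f" then "{\"button\":\"folder-" ++ p.2.2.2 ++ "\"}"
   else "{\"button\":\"doc-" ++ p.2.2.2 ++ "\"}")

def pvTitleOf (p : String × String × String × String) : String := p.2.1 ++ ") " ++ p.2.2.1

def pvBs (ps : List (String × String × String × String)) : List (String × String × String) :=
  ps.map pvBtnOf
def pvFt (ps : List (String × String × String × String)) : List String :=
  (ps.filter (fun p => p.1 == "f")).map pvTitleOf
def pvDt (ps : List (String × String × String × String)) : List String :=
  (ps.filter (fun p => !(p.1 == "f"))).map pvTitleOf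

-- A's line-filling on the flat button list: returns (finished lines, current key, current line)
def fillFrom (n : Int) (num : Int) (cur : List (String × String × String)) :
    List (String × String × String) →
    List (Int × List (String × String × String)) × Int × List (String × String × String)
  | [] => ([], num, cur)
  | b :: bs =>
    if ((cur.length : Int) + 1 = n) then
      let r := fillFrom n (num + 1) [] bs
      ((num, cur ++ [b]) :: r.1, r.2)
    else
      fillFrom n num (cur ++ [b]) bs

def numbered (num : Int) : List (List (String × String × String)) →
    List (Int × List (String × String × String))
  | [] => []
  | c :: cs => (num, c) :: numbered (num + 1) cs

theorem scanB_eq (ps : List (String × String × String × String))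
    (bs : List (String × String × String)) (ft dt : List String) :
    scanB ps (bs, ft, dt) = (bs ++ pvBs ps, ft ++ pvFt ps, dt ++ pvDt ps) := by
  induction ps generalizing bs ft dt with
  | nil => simp [scanB, pvBs, pvFt, pvDt]
  | cons p rest ih =>
    by_cases h : p.1 == "f" <;>
      simp [scanB, h, ih, pvBs, pvFt, pvDt, pvBtnOf, pvTitleOf]

-- dict helper lemmas (keys of pref all differ from num)
theorem dict_find_last (pref : List (Int × List (String × String × String))) (num : Int)
    (cur : List (String × String × String)) (h : ∀ q ∈ pref, q.1 ≠ num) :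
    List.find? (fun p => p.1 == num) (pref ++ [(num, cur)]) = some (num, cur) := by
  rw [List.find?_append]
  have : List.find? (fun p => p.1 == num) pref = none := by
    rw [List.find?_eq_none]
    intro q hq
    simpa using h q hq
  simp [this]

theorem dict_getD_last (pref : List (Int × List (String × String × String))) (num : Int)
    (cur d0 : List (String × String × String)) (h : ∀ q ∈ pref, q.1 ≠ num) :
    (PySem.Dict.mk (pref ++ [(num, cur)])).getD num d0 = cur := by
  simp [PySem.Dict.getD, PySem.Dict.get?, dict_find_last pref num cur h]

theorem dict_modify_last (pref : List (Int × List (String × String × String))) (num : Int)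
    (cur : List (String × String × String)) (f : List (String × String × String) → List (String × String × String))
    (h : ∀ q ∈ pref, q.1 ≠ num) :
    (PySem.Dict.mk (pref ++ [(num, cur)])).modify num [] f = PySem.Dict.mk (pref ++ [(num, f cur)]) := by
  have hc : (PySem.Dict.mk (pref ++ [(num, cur)])).contains num = true := by
    simp [PySem.Dict.contains]
  have hg := dict_getD_last pref num cur [] h
  simp only [PySem.Dict.modify, PySem.Dict.insert, hc, if_pos, hg]
  congr 1
  rw [List.map_append]
  congr 1
  · have hid : ∀ q ∈ pref, (fun (p : Int × List (String × String × String)) =>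
        if (p.1 == num) = true then (num, f cur) else p) q = id q := by
      intro q hq; simp [h q hq]
    rw [List.map_congr_left hid, List.map_id]
  · simp

theorem dict_insert_fresh (l : List (Int × List (String × String × String))) (k : Int)
    (v : List (String × String × String)) (h : ∀ q ∈ l, q.1 ≠ k) :
    (PySem.Dict.mk l).insert k v = PySem.Dict.mk (l ++ [(k, v)]) := by
  have hc : (PySem.Dict.mk l).contains k = false := by
    simp [PySem.Dict.contains]
    intro a b hab
    exact h (a, b) hab
  simp [PySem.Dict.insert, hc]

theorem dict_erase_last (l : List (Int × List (String × String × String))) (k : Int)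
    (v : List (String × String × String)) (h : ∀ q ∈ l, q.1 ≠ k) :
    (PySem.Dict.mk (l ++ [(k, v)])).erase k = PySem.Dict.mk l := by
  simp only [PySem.Dict.erase, List.filter_append]
  congr 1
  rw [List.filter_eq_self.2 (by intro q hq; simpa using h q hq)]
  simp

-- key bounds of fillFrom
theorem fillFrom_keys (n : Int) (bs : List (String × String × String)) :
    ∀ num cur, (∀ q ∈ (fillFrom n num cur bs).1, q.1 < (fillFrom n num cur bs).2.1) ∧
      num ≤ (fillFrom n num cur bs).2.1 := by
  induction bs with
  | nil => intro num cur; simp [fillFrom]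
  | cons b bs ih =>
    intro num cur
    by_cases h : ((cur.length : Int) + 1 = n)
    · obtain ⟨h1, h2⟩ := ih (num + 1) []
      rw [show fillFrom n num cur (b :: bs) =
          ((num, cur ++ [b]) :: (fillFrom n (num + 1) [] bs).1, fillFrom n (num + 1) [] bs |>.2)
        from by rw [fillFrom, if_pos h]]
      refine ⟨?_, ?_⟩
      · intro q hq
        rcases List.mem_cons.1 hq with hq | hq
        · rw [hq]; show num < (fillFrom n (num + 1) [] bs).2.1; omega
        · exact h1 q hq
      · show num ≤ (fillFrom n (num + 1) [] bs).2.1; omega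
    · obtain ⟨h1, h2⟩ := ih num (cur ++ [b])
      rw [show fillFrom n num cur (b :: bs) = fillFrom n num (cur ++ [b]) bs
        from by rw [fillFrom, if_neg h]]
      exact ⟨h1, h2⟩

-- A's loop over ps, from a dict 'pref ++ [(num, cur)]' whose pref-keys are all < num,
-- equals fillFrom on the flat button list (plus the accumulated titles).
theorem fillLoopA_eq (n : Int) (ps : List (String × String × String × String)) :
    ∀ pref num cur ft dt, (∀ q ∈ pref, q.1 < num) →
    fillLoopA n (PySem.Dict.mk (pref ++ [(num, cur)]), num, ft, dt) ps =
      (PySem.Dict.mk (pref ++ (fillFrom n num cur (pvBs ps)).1 ++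
        [((fillFrom n num cur (pvBs ps)).2.1, (fillFrom n num cur (pvBs ps)).2.2)]),
       (fillFrom n num cur (pvBs ps)).2.1, ft ++ pvFt ps, dt ++ pvDt ps) := by
  induction ps with
  | nil => intro pref num cur ft dt _; simp [fillLoopA, fillFrom, pvBs, pvFt, pvDt]
  | cons p rest ih =>
    intro pref num cur ft dt hpref
    have hne : ∀ q ∈ pref, q.1 ≠ num := fun q hq => ne_of_lt (hpref q hq)
    have hmod := dict_modify_last pref num cur (· ++ [pvBtnOf p]) hne
    have hget := dict_getD_last pref num (cur ++ [pvBtnOf p]) [] hne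
    have hlb : pvBs (p :: rest) = pvBtnOf p :: pvBs rest := rfl
    have hstep : fillLoopA n (PySem.Dict.mk (pref ++ [(num, cur)]), num, ft, dt) (p :: rest) =
        (if ((cur.length : Int) + 1 = n) then
          fillLoopA n (PySem.Dict.mk ((pref ++ [(num, cur ++ [pvBtnOf p])]) ++ [(num + 1, [])]),
            num + 1, ft ++ pvFt [p], dt ++ pvDt [p]) rest
        else
          fillLoopA n (PySem.Dict.mk (pref ++ [(num, cur ++ [pvBtnOf p])]),
            num, ft ++ pvFt [p], dt ++ pvDt [p]) rest) := by
      have hlen2 : (((cur ++ [pvBtnOf p]).length : Int)) = (cur.length : Int) + 1 := by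
        simp
      have hins := dict_insert_fresh (pref ++ [(num, cur ++ [pvBtnOf p])]) (num + 1) []
        (by intro q hq
            rcases List.mem_append.1 hq with hq | hq
            · have := hpref q hq; omega
            · simp only [List.mem_singleton] at hq
              rw [hq]; show ¬ num = num + 1; omega)
      by_cases hf : p.1 == "f"
      · simp only [fillLoopA, hf, if_pos, Bool.not_true]
        simp only [pvBtnOf, hf, if_pos] at hmod hget hlen2 hins
        simp only [hmod, hget, hlen2, hins, pvFt, pvDt, pvBtnOf, pvTitleOf, hf,
          List.filter_cons, List.filter_nil, List.map_cons, List.map_nil,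
          Bool.not_true, Bool.false_eq_true, if_false, if_pos, if_neg, List.append_nil]
      · rw [Bool.not_eq_true] at hf
        simp only [fillLoopA, hf, Bool.false_eq_true, if_false, Bool.not_false]
        simp only [pvBtnOf, hf, Bool.false_eq_true, if_false] at hmod hget hlen2 hins
        simp only [hmod, hget, hlen2, hins, pvFt, pvDt, pvBtnOf, pvTitleOf, hf,
          List.filter_cons, List.filter_nil, List.map_cons, List.map_nil,
          Bool.not_false, Bool.true_eq_false, Bool.false_eq_true, if_false, if_pos, if_neg,
          List.append_nil]
    rw [hstep]
    by_cases hlen : ((cur.length : Int) + 1 = n)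
    · rw [if_pos hlen]
      rw [ih (pref ++ [(num, cur ++ [pvBtnOf p])]) (num + 1) [] _ _
        (by intro q hq
            rcases List.mem_append.1 hq with hq | hq
            · have := hpref q hq; omega
            · simp only [List.mem_singleton] at hq
              rw [hq]; show num < num + 1; omega)]
      rw [hlb, show fillFrom n num cur (pvBtnOf p :: pvBs rest) =
          ((num, cur ++ [pvBtnOf p]) :: (fillFrom n (num + 1) [] (pvBs rest)).1,
            fillFrom n (num + 1) [] (pvBs rest) |>.2)
        from by rw [fillFrom, if_pos hlen]]
      simp [pvFt, pvDt, List.filter_append, List.map_append]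
      refine ⟨?_, ?_⟩ <;> cases hc : (p.1 == "f") <;> simp [List.filter_cons, hc]
    · rw [if_neg hlen]
      rw [ih pref num (cur ++ [pvBtnOf p]) _ _ hpref]
      rw [hlb, show fillFrom n num cur (pvBtnOf p :: pvBs rest) =
          fillFrom n num (cur ++ [pvBtnOf p]) (pvBs rest)
        from by rw [fillFrom, if_neg hlen]]
      simp [pvFt, pvDt, List.filter_append, List.map_append]
      refine ⟨?_, ?_⟩ <;> cases hc : (p.1 == "f") <;> simp [List.filter_cons, hc]

-- n ≤ 0: no line ever fills
theorem fillFrom_nonpos (n : Int) (hn : n ≤ 0) (bs : List (String × String × String)) :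
    ∀ num cur, fillFrom n num cur bs = ([], num, cur ++ bs) := by
  induction bs with
  | nil => intro num cur; simp [fillFrom]
  | cons b bs ih =>
    intro num cur
    have h : ¬ ((cur.length : Int) + 1 = n) := by omega
    rw [show fillFrom n num cur (b :: bs) = fillFrom n num (cur ++ [b]) bs
      from by rw [fillFrom, if_neg h]]
    rw [ih]; simp

-- n = k+1 > 0: fillFrom produces exactly the chunks of cur ++ bs
theorem fillFrom_chunks (k : Nat) (n : Int) (hn : n = (k : Int) + 1)
    (bs : List (String × String × String)) :
    ∀ num cur, cur.length ≤ k →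
      ((fillFrom n num cur bs).1 ++
        (if (fillFrom n num cur bs).2.2.isEmpty then []
         else [((fillFrom n num cur bs).2.1, (fillFrom n num cur bs).2.2)]) =
        numbered num (chunkPos k (cur ++ bs))) ∧
      ((if (fillFrom n num cur bs).2.2.isEmpty then (fillFrom n num cur bs).2.1 - 1
        else (fillFrom n num cur bs).2.1) =
        num + (chunkPos k (cur ++ bs)).length - 1) := by
  induction bs with
  | nil =>
    intro num cur hcur
    rcases eq_or_ne cur [] with h | h
    · simp [fillFrom, h, chunkPos, numbered]
    · have : chunkPos k cur = [cur] := by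
        match cur, h with
        | c :: cur', _ =>
          rw [chunkPos]
          have h1 : (c :: cur').take (k + 1) = c :: cur' :=
            List.take_of_length_le (by simp only [List.length_cons] at hcur ⊢; omega)
          have h2 : (c :: cur').drop (k + 1) = [] :=
            List.drop_eq_nil_of_le (by simp only [List.length_cons] at hcur ⊢; omega)
          rw [h1, h2, chunkPos]
      simp [fillFrom, h, this, numbered]
  | cons b bs ih =>
    intro num cur hcur
    by_cases hlen : ((cur.length : Int) + 1 = n)
    · have hk : cur.length = k := by omega
      have hchunk : chunkPos k (cur ++ b :: bs) = (cur ++ [b]) :: chunkPos k bs := by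
        have hx : cur ++ b :: bs = (cur ++ [b]) ++ bs := by simp
        obtain ⟨c, t, hct⟩ : ∃ c t, cur ++ [b] = c :: t := by
          cases hcu : cur ++ [b] with
          | nil => exact absurd hcu (by simp)
          | cons c t => exact ⟨c, t, rfl⟩
        have hl : (c :: t).length = k + 1 := by rw [← hct]; simp [hk]
        rw [hx, hct, List.cons_append, chunkPos]
        have h1 : (c :: (t ++ bs)).take (k + 1) = c :: t := by
          rw [← List.cons_append, List.take_append_of_le_length (le_of_eq hl.symm),
            List.take_of_length_le (le_of_eq hl)]
        have h2 : (c :: (t ++ bs)).drop (k + 1) = bs := by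
          rw [← List.cons_append, List.drop_append_of_le_length (le_of_eq hl.symm),
            List.drop_eq_nil_of_le (le_of_eq hl)]
          simp
        rw [h1, h2]
      obtain ⟨ih1, ih2⟩ := ih (num + 1) [] (by simp)
      simp only [List.nil_append] at ih1 ih2
      rw [show fillFrom n num cur (b :: bs) =
          ((num, cur ++ [b]) :: (fillFrom n (num + 1) [] bs).1, fillFrom n (num + 1) [] bs |>.2)
        from by rw [fillFrom, if_pos hlen]]
      constructor
      · show ((num, cur ++ [b]) :: (fillFrom n (num + 1) [] bs).1) ++
            (if (fillFrom n (num + 1) [] bs).2.2.isEmpty then []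
             else [((fillFrom n (num + 1) [] bs).2.1, (fillFrom n (num + 1) [] bs).2.2)]) =
            numbered num (chunkPos k (cur ++ b :: bs))
        rw [hchunk, List.cons_append, ih1]
        rfl
      · show (if (fillFrom n (num + 1) [] bs).2.2.isEmpty then (fillFrom n (num + 1) [] bs).2.1 - 1
             else (fillFrom n (num + 1) [] bs).2.1) =
            num + (chunkPos k (cur ++ b :: bs)).length - 1
        rw [hchunk]
        by_cases he : (fillFrom n (num + 1) [] bs).2.2.isEmpty <;>
          simp only [he, Bool.false_eq_true, if_pos, if_false, if_true, List.length_cons] at ih2 ⊢ <;>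
          push_cast at ih2 ⊢ <;> omega
    · have hc' : (cur ++ [b]).length ≤ k := by simp; omega
      rw [show fillFrom n num cur (b :: bs) = fillFrom n num (cur ++ [b]) bs
        from by rw [fillFrom, if_neg hlen]]
      rw [show cur ++ b :: bs = (cur ++ [b]) ++ bs from by simp]
      exact ih num (cur ++ [b]) hc'

-- B's numbering fold appends fresh increasing keys
theorem foldB_eq (cs : List (List (String × String × String))) :
    ∀ (l : List (Int × List (String × String × String))) (num : Int),
      (∀ q ∈ l, q.1 ≤ num) →
      cs.foldl (fun (st : PySem.Dict Int (List (String × String × String)) × Int) c =>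
        (st.1.insert (st.2 + 1) c, st.2 + 1)) (PySem.Dict.mk l, num) =
      (PySem.Dict.mk (l ++ numbered (num + 1) cs), num + cs.length) := by
  induction cs with
  | nil => intro l num _; simp [numbered]
  | cons c cs ih =>
    intro l num hl
    have hins := dict_insert_fresh l (num + 1) c
      (fun q hq => by have := hl q hq; omega)
    simp only [List.foldl_cons, hins]
    rw [ih (l ++ [(num + 1, c)]) (num + 1)
      (by intro q hq; simp at hq
          rcases hq with hq | hq
          · have := hl q hq; omega
          · rw [hq])]
    simp [numbered]
    omega

-- the two ports agree for a given initial (pref, num0) with pref-keys < num0 (num0 = 1 or 2)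
theorem core_eq (n : Int) (ps : List (String × String × String × String))
    (pref : List (Int × List (String × String × String))) (num0 : Int)
    (hpref : ∀ q ∈ pref, q.1 < num0) :
    (let r := fillLoopA n (PySem.Dict.mk (pref ++ [(num0, [])]), num0, [], []) ps
     let fin : PySem.Dict Int (List (String × String × String)) × Int :=
       if (r.1.getD r.2.1 []).isEmpty then (r.1.erase r.2.1, r.2.1 - 1) else (r.1, r.2.1)
     ((fin.1.items, fin.2, r.2.2.1, r.2.2.2) :
       (List (Int × List (String × String × String))) × Int × List String × List String)) =
    (let s := scanB ps ([], [], [])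
     let cs := chunksB n s.1
     let r := cs.foldl (fun (st : PySem.Dict Int (List (String × String × String)) × Int) c =>
       (st.1.insert (st.2 + 1) c, st.2 + 1)) (PySem.Dict.mk pref, num0 - 1)
     (r.1.items, r.2, s.2.1, s.2.2)) := by
  obtain ⟨hkeys, hnum⟩ := fillFrom_keys n (pvBs ps) num0 []
  set F := fillFrom n num0 [] (pvBs ps) with hF
  -- the chunk correspondence, uniformly over the sign of n
  have hP : (if F.2.2.isEmpty then pref ++ F.1 else (pref ++ F.1) ++ [(F.2.1, F.2.2)]) =
      pref ++ numbered num0 (chunksB n (pvBs ps)) ∧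
      (if F.2.2.isEmpty then F.2.1 - 1 else F.2.1) =
        (num0 - 1) + (chunksB n (pvBs ps)).length := by
    by_cases hn : n ≤ 0
    · have hnp : F = ([], num0, pvBs ps) := by
        rw [hF]
        have := fillFrom_nonpos n hn (pvBs ps) num0 []
        simpa using this
      rcases eq_or_ne (pvBs ps) [] with hbs | hbs
      · rw [hnp, hbs]
        simp [chunksB, hn, numbered]
      · have hbe : (pvBs ps).isEmpty = false := by simp [List.isEmpty_iff, hbs]
        rw [hnp]
        simp only [chunksB, if_pos hn, hbe, Bool.false_eq_true, if_false, hbe]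
        simp [numbered, hbs]
    · push_neg at hn
      have hnk : n = (((n - 1).toNat : Int)) + 1 := by omega
      obtain ⟨hc1, hc2⟩ := fillFrom_chunks (n - 1).toNat n hnk (pvBs ps) num0 [] (by simp)
      simp only [List.nil_append] at hc1 hc2
      rw [← hF] at hc1 hc2
      have hcs : chunksB n (pvBs ps) = chunkPos (n - 1).toNat (pvBs ps) := by
        rw [chunksB, if_neg (by omega)]
        congr 1
        omega
      rw [hcs]
      by_cases he : F.2.2.isEmpty
      · simp only [he, if_true] at hc1 hc2 ⊢
        exact ⟨by rw [← hc1]; simp, by omega⟩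
      · simp only [he, Bool.false_eq_true, if_false] at hc1 hc2 ⊢
        exact ⟨by rw [← hc1]; simp, by omega⟩
  -- assemble both sides
  have hfold := foldB_eq (chunksB n (pvBs ps)) pref (num0 - 1)
    (fun q hq => by have := hpref q hq; omega)
  rw [show num0 - 1 + 1 = num0 from by omega] at hfold
  have hgetD : (PySem.Dict.mk (pref ++ F.1 ++ [(F.2.1, F.2.2)])).getD F.2.1 [] = F.2.2 :=
    dict_getD_last _ _ _ _ (by
      intro q hq
      rcases List.mem_append.1 hq with hq | hq
      · exact ne_of_lt (lt_of_lt_of_le (hpref q hq) hnum)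
      · exact ne_of_lt (hkeys q hq))
  have herase : (PySem.Dict.mk (pref ++ F.1 ++ [(F.2.1, F.2.2)])).erase F.2.1 =
      PySem.Dict.mk (pref ++ F.1) :=
    dict_erase_last _ _ _ (by
      intro q hq
      rcases List.mem_append.1 hq with hq | hq
      · exact ne_of_lt (lt_of_lt_of_le (hpref q hq) hnum)
      · exact ne_of_lt (hkeys q hq))
  dsimp only
  rw [fillLoopA_eq n ps pref num0 [] [] [] hpref, scanB_eq]
  simp only [List.nil_append]
  rw [← hF, hfold, hgetD, herase]
  by_cases he : F.2.2.isEmpty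
  · simp only [he, if_true] at hP ⊢
    rw [hP.1, hP.2]
  · simp only [he, Bool.false_eq_true, if_false] at hP ⊢
    rw [hP.1, hP.2]

-- ===== VERDICT (by name: the statement is the Claim_ definition above) =====
theorem fill_f_and_d_in_kb_spec : Claim_equal_fill_f_and_d_in_kb := by
  intro f_and_d n fl _
  unfold Spec_fill_f_and_d_in_kb fill_f_and_d_in_kb fill_f_and_d_in_kb_alt
  match fl with
  | none =>
    have := core_eq n f_and_d [] 1 (by simp)
    simpa using this
  | some l =>
    have := core_eq n f_and_d [(1, [l])] 2 (by simp)
    simpa using this
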